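-- pv_equiv track=rewrite | github.com/reynaraalbert/web-statistik-kekerasan-seksual | 05_ekstrak_universitas_v2.py | ekstrak_pelaku
-- ===== SOURCE A (Python) =====
-- PELAKU = {
--     "dosen pembimbing":         "Dosen Pembimbing",
--     "dosen":                    "Dosen",
--     "profesor":                 "Dosen",
--     "guru besar":               "Dosen",
--     "rektor":                   "Rektor/Pimpinan",
--     "dekan":                    "Rektor/Pimpinan",
--     "wakil rektor":             "Rektor/Pimpinan",
--     "direktur":                 "Rektor/Pimpinan",
--     "ketua program studi":      "Rektor/Pimpinan",
--     "kaprodi":                  "Rektor/Pimpinan",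
--     "mahasiswa":                "Mahasiswa",
--     "senior":                   "Senior/Kakak Tingkat",
--     "kakak tingkat":            "Senior/Kakak Tingkat",
--     "bem":                      "Pengurus BEM/Organisasi",
--     "ketua bem":                "Pengurus BEM/Organisasi",
--     "ketua organisasi":         "Pengurus BEM/Organisasi",
--     "panitia":                  "Panitia Kegiatan",
--     "tendik":                   "Tenaga Kependidikan",
--     "satpam":                   "Tenaga Kependidikan",
--     "karyawan":                 "Tenaga Kependidikan",
--     "alumni":                   "Alumni",
-- }
--
-- def ekstrak_pelaku(teks: str):
--     if not teks:
--         return "Tidak Diketahui"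
--     t = teks.lower()
--     for kw, label in sorted(PELAKU.items(), key=lambda x: -len(x[0])):
--         if kw in t:
--             return label
--     return "Tidak Diketahui"
-- ===== SOURCE B (Python) =====
-- PELAKU = {
--     "dosen pembimbing":         "Dosen Pembimbing",
--     "dosen":                    "Dosen",
--     "profesor":                 "Dosen",
--     "guru besar":               "Dosen",
--     "rektor":                   "Rektor/Pimpinan",
--     "dekan":                    "Rektor/Pimpinan",
--     "wakil rektor":             "Rektor/Pimpinan",
--     "direktur":                 "Rektor/Pimpinan",
--     "ketua program studi":      "Rektor/Pimpinan",
--     "kaprodi":                  "Rektor/Pimpinan",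
--     "mahasiswa":                "Mahasiswa",
--     "senior":                   "Senior/Kakak Tingkat",
--     "kakak tingkat":            "Senior/Kakak Tingkat",
--     "bem":                      "Pengurus BEM/Organisasi",
--     "ketua bem":                "Pengurus BEM/Organisasi",
--     "ketua organisasi":         "Pengurus BEM/Organisasi",
--     "panitia":                  "Panitia Kegiatan",
--     "tendik":                   "Tenaga Kependidikan",
--     "satpam":                   "Tenaga Kependidikan",
--     "karyawan":                 "Tenaga Kependidikan",
--     "alumni":                   "Alumni",
-- }
--
-- def ekstrak_pelaku(teks: str):
--     if not teks:
--         return "Tidak Diketahui"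
--     t = teks.lower()
--     best_len = -1
--     best_label = "Tidak Diketahui"
--     for kw, label in PELAKU.items():
--         if kw in t and len(kw) > best_len:
--             best_len = len(kw)
--             best_label = label
--     return best_label
-- ===== Notes on version B (the rewrite author's own statement) =====
-- stated objective: simpler
-- what changed: Replaced sort-by-descending-keyword-length followed by first-substring-match with a single running-maximum pass over the dict in insertion order (strict > keeps the stable sort's dict-order tie-break), removing the sort entirely.
import Mathlib
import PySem

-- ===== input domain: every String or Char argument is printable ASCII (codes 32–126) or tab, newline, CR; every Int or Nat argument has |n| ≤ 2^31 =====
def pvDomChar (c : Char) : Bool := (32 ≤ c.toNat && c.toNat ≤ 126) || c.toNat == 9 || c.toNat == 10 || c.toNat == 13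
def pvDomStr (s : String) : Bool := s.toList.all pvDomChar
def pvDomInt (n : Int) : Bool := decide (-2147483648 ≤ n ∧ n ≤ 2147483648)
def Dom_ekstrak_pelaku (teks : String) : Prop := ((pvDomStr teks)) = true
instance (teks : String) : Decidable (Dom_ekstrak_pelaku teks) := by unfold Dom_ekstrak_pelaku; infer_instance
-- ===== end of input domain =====

-- B replaces A's sort-by-descending-keyword-length + first-match scan with a single
-- running-maximum pass over the dict in insertion order (objective: simpler).


-- ===== PORT A =====
-- the module-level PELAKU dict, as an association list in insertion order
def pelakuList : List (String × String) :=
  [("dosen pembimbing", "Dosen Pembimbing"),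
   ("dosen", "Dosen"),
   ("profesor", "Dosen"),
   ("guru besar", "Dosen"),
   ("rektor", "Rektor/Pimpinan"),
   ("dekan", "Rektor/Pimpinan"),
   ("wakil rektor", "Rektor/Pimpinan"),
   ("direktur", "Rektor/Pimpinan"),
   ("ketua program studi", "Rektor/Pimpinan"),
   ("kaprodi", "Rektor/Pimpinan"),
   ("mahasiswa", "Mahasiswa"),
   ("senior", "Senior/Kakak Tingkat"),
   ("kakak tingkat", "Senior/Kakak Tingkat"),
   ("bem", "Pengurus BEM/Organisasi"),
   ("ketua bem", "Pengurus BEM/Organisasi"),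
   ("ketua organisasi", "Pengurus BEM/Organisasi"),
   ("panitia", "Panitia Kegiatan"),
   ("tendik", "Tenaga Kependidikan"),
   ("satpam", "Tenaga Kependidikan"),
   ("karyawan", "Tenaga Kependidikan"),
   ("alumni", "Alumni")]

-- A's for-loop with early return: first pair whose keyword occurs in t
def ekstrak_pelaku_go (t : String) : List (String × String) → String
  | [] => "Tidak Diketahui"
  | (kw, label) :: rest =>
      if PySem.Str.isIn kw t then label else ekstrak_pelaku_go t rest

def ekstrak_pelaku (teks : String) : String :=
  if teks = "" then "Tidak Diketahui"
  else
    let t := PySem.Str.lower teks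
    ekstrak_pelaku_go t (PySem.List.sorted pelakuList (fun x => -(PySem.Str.len x.1)))

-- ===== PORT B =====
-- B's loop body: update the running maximum on a strictly longer matching keyword
def ekstrak_pelaku_altStep (t : String) (acc : Int × String) (p : String × String) :
    Int × String :=
  if PySem.Str.isIn p.1 t && decide (PySem.Str.len p.1 > acc.1)
  then (PySem.Str.len p.1, p.2) else acc

def ekstrak_pelaku_alt (teks : String) : String :=
  if teks = "" then "Tidak Diketahui"
  else
    let t := PySem.Str.lower teks
    (pelakuList.foldl (ekstrak_pelaku_altStep t) (-1, "Tidak Diketahui")).2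

-- ===== PRECONDITION & SPEC =====
def Spec_ekstrak_pelaku (teks : String) (out : String) : Prop := out = ekstrak_pelaku_alt teks
instance (teks : String) (out : String) : Decidable (Spec_ekstrak_pelaku teks out) := by unfold Spec_ekstrak_pelaku; infer_instance

-- ===== CLAIM (what is proved, stated in full; the proofs are below) =====
def Claim_equal_ekstrak_pelaku : Prop := ∀ (teks : String), Dom_ekstrak_pelaku teks → Spec_ekstrak_pelaku teks (ekstrak_pelaku teks)

-- ===== LEMMAS AND PROOFS =====

-- B's step commutes on two pairs of distinct keyword lengths
theorem ekstrak_pelaku_altStep_comm (t : String) (acc : Int × String)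
    (p q : String × String) (h : PySem.Str.len p.1 ≠ PySem.Str.len q.1) :
    ekstrak_pelaku_altStep t (ekstrak_pelaku_altStep t acc p) q =
      ekstrak_pelaku_altStep t (ekstrak_pelaku_altStep t acc q) p := by
  rcases acc with ⟨n, s⟩
  by_cases hp : PySem.Str.isIn p.1 t = true <;>
    by_cases hq : PySem.Str.isIn q.1 t = true <;>
      simp only [Bool.not_eq_true] at hp hq <;>
        simp only [ekstrak_pelaku_altStep, hp, hq, Bool.false_and, Bool.true_and,
          Bool.false_eq_true, if_false, decide_eq_true_eq] <;>
          split_ifs <;> simp_all <;> omega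

-- proof-side stable insertion sort by descending keyword length
def insLen (p : String × String) : List (String × String) → List (String × String)
  | [] => [p]
  | q :: r => if PySem.Str.len p.1 < PySem.Str.len q.1 then q :: insLen p r else p :: q :: r

def sortLen : List (String × String) → List (String × String)
  | [] => []
  | p :: l => insLen p (sortLen l)

theorem foldl_insLen (t : String) (p : String × String) (l : List (String × String))
    (acc : Int × String) :
    (insLen p l).foldl (ekstrak_pelaku_altStep t) acc =
      (p :: l).foldl (ekstrak_pelaku_altStep t) acc := by
  induction l generalizing acc with
  | nil => rfl
  | cons q r ih =>
    unfold insLen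
    split
    · next hlt =>
      simp only [List.foldl_cons]
      rw [ih, List.foldl_cons]
      rw [ekstrak_pelaku_altStep_comm t acc q p (Ne.symm (ne_of_lt hlt))]
    · rfl

theorem foldl_sortLen (t : String) (l : List (String × String)) (acc : Int × String) :
    (sortLen l).foldl (ekstrak_pelaku_altStep t) acc =
      l.foldl (ekstrak_pelaku_altStep t) acc := by
  induction l generalizing acc with
  | nil => rfl
  | cons p r ih =>
    show (insLen p (sortLen r)).foldl _ acc = _
    rw [foldl_insLen, List.foldl_cons, ih, List.foldl_cons]

theorem foldl_no_update (t : String) (l : List (String × String)) (acc : Int × String)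
    (h : ∀ p ∈ l, PySem.Str.len p.1 ≤ acc.1) :
    l.foldl (ekstrak_pelaku_altStep t) acc = acc := by
  induction l with
  | nil => rfl
  | cons p r ih =>
    have hp : ¬ (PySem.Str.len p.1 > acc.1) := not_lt.mpr (h p (List.mem_cons_self ..))
    have hstep : ekstrak_pelaku_altStep t acc p = acc := by
      unfold ekstrak_pelaku_altStep
      rw [if_neg (by simp only [Bool.and_eq_true, decide_eq_true_eq, not_and]; exact fun _ => hp)]
    rw [List.foldl_cons, hstep]
    exact ih (fun q hq => h q (List.mem_cons_of_mem _ hq))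

theorem go_eq_fold (t : String) (l : List (String × String))
    (hl : l.Pairwise (fun a b => PySem.Str.len b.1 ≤ PySem.Str.len a.1)) :
    ekstrak_pelaku_go t l = (l.foldl (ekstrak_pelaku_altStep t) (-1, "Tidak Diketahui")).2 := by
  induction l with
  | nil => rfl
  | cons p r ih =>
    rcases List.pairwise_cons.mp hl with ⟨hpr, htail⟩
    rcases p with ⟨kw, label⟩
    have hgo : ekstrak_pelaku_go t ((kw, label) :: r) =
        if PySem.Str.isIn kw t then label else ekstrak_pelaku_go t r := rfl
    by_cases hin : PySem.Str.isIn kw t = true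
    · have hlen : (0 : Int) ≤ PySem.Str.len kw := by
        simp [PySem.Str.len_eq]
      have hstep : ekstrak_pelaku_altStep t (-1, "Tidak Diketahui") (kw, label) =
          (PySem.Str.len kw, label) := by
        unfold ekstrak_pelaku_altStep
        rw [if_pos (by simp only [hin, Bool.true_and, decide_eq_true_eq]; omega)]
      rw [List.foldl_cons, hstep, foldl_no_update t r _ hpr, hgo, if_pos hin]
    · have hstep : ekstrak_pelaku_altStep t (-1, "Tidak Diketahui") (kw, label) =
          (-1, "Tidak Diketahui") := by
        unfold ekstrak_pelaku_altStep
        rw [if_neg (by simp only [Bool.and_eq_true, decide_eq_true_eq]; exact fun hc => absurd hc.1 hin)]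
      rw [List.foldl_cons, hstep, hgo, if_neg hin]
      exact ih htail

theorem sorted_pelaku_eq :
    PySem.List.sorted pelakuList (fun x => -(PySem.Str.len x.1)) = sortLen pelakuList := by
  decide

theorem sortLen_pairwise :
    (sortLen pelakuList).Pairwise (fun a b => PySem.Str.len b.1 ≤ PySem.Str.len a.1) := by
  decide

-- ===== VERDICT (by name: the statement is the Claim_ definition above) =====
theorem ekstrak_pelaku_spec : Claim_equal_ekstrak_pelaku := by
  intro teks _
  unfold Spec_ekstrak_pelaku ekstrak_pelaku ekstrak_pelaku_alt
  by_cases h : teks = ""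
  · simp [h]
  · simp only [h, if_false]
    rw [sorted_pelaku_eq, go_eq_fold _ _ sortLen_pairwise, foldl_sortLen]
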